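/- GENERATED by mk_final_copies.py from the proof of the farm's unit `vorbis_decode_initial.8` (farm:vorbis_decode_initial.8.1: Proof.lean) as the
   re-elaboration sweep compiled it — do not edit. -/
import Asan.CheckWalk
import Vorbis.Spec.Units.vorbis_decode_initial_8
import Vorbis.Spec.Worked.vorbis_decode_initial_8_Lemmas

open X86 X86.User Asan Vorbis Vorbis.Spec Vorbis.Spec.vorbis_decode_initial

set_option maxRecDepth 4000
set_option maxHeartbeats 4000000

namespace Vorbis.Spec.vorbis_decode_initial_8

/-- Segment 8 of `vorbis_decode_initial` (0x113337–0x1133bc, 34 instructions, five check sites per arm, no contract call;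
stb_vorbis_fixed.c 3196–3204): `if (m->blockflag && !next)` — the byte at r14 is read UNCHECKED at 0x113337 (`side_has` from where
`*f` lies) —, the long arm `*p_right_start = (n*3 - b0) >> 2 ; *p_right_end = (n*3 + b0) >> 2`, the short arm `*p_right_start =
window_center ; *p_right_end = n`, `return TRUE`: from `IAtRight` at the join `at_113337` to `IAtEnd` at the epilogue `at_1133c3`.
ONE walk (three paths: the short arm is reached with `bf = 0` and with `bf ≠ 0 ∧ next ≠ 0`); every path ends with `exit_ok`
(Lemmas.lean), which builds `IAtEnd` from the walker's final memory and W2's right half of the two stored values. -/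
theorem seg8 : Vorbis.Spec.vorbis_decode_initial_8.Statement := by
  intro Lay hLay μ hμ u₀ hcode hstore4 hload4 others frames len A stored room ysz u ret i bf n s hE hs
  have hs0 := hs
  have he := hE.entry
  have hpre := hE.pre
  v_entry he
  have hsp := hpre.1.rsp
  obtain ⟨hsh, hinv, hpls, hple, hprs, hpre_, hpm, hapart⟩ := hpre
  have hobj := hinv.objLive
  have hwhere := hobj.where_ hsh.inv hsh.offText (by decide)
  simp only [Off.sizeof.stb_vorbis] at hwhere
  have hoff := hinv.objOff
  simp only [Off.sizeof.stb_vorbis] at hoff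
  -- HD3 of the entry memory: `64 ≤ b0 ≤ b1 ≤ 8192`, the two fields as the walker reads them
  have hd3 := hinv.fb.vorbis.header.HD3.range
  have eB0 : stb_vorbis.blocksize_0 u.mem (u.reg .rdi).toNat = sint32 (u.mem.readLE (u.reg .rdi + 152) 4) := by
    simp only [vacc, voff]
    rw [Mem.i32_def]
    unfold Mem.u32
    exact congrArg sint32 (readLE_field u.mem (u.reg .rdi) 152 4).symm
  have eB1 : stb_vorbis.blocksize_1 u.mem (u.reg .rdi).toNat = sint32 (u.mem.readLE (u.reg .rdi + 156) 4) := by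
    simp only [vacc, voff]
    rw [Mem.i32_def]
    unfold Mem.u32
    exact congrArg sint32 (readLE_field u.mem (u.reg .rdi) 156 4).symm
  rw [eB0, eB1] at hd3
  have hb0le : u.mem.readLE (u.reg .rdi + 152) 4 ≤ 8192 :=
    nat_of_sint32_range _ (X86.User.Mem.readLE_lt u.mem _ 4) hd3.1 (by omega)
  have hb1le : u.mem.readLE (u.reg .rdi + 156) 4 ≤ 8192 :=
    nat_of_sint32_range _ (X86.User.Mem.readLE_lt u.mem _ 4) (by omega) hd3.2.2
  -- the two out-objects the segment stores to: live 4-byte stack objects above the own frame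
  have hlrs := hprs.1
  have hlre := hpre_.1
  have hwrs := hprs.1.where_ hsh.inv hsh.offText (by decide)
  have hwre := hpre_.1.where_ hsh.inv hsh.offText (by decide)
  obtain ⟨_, a1, a2⟩ := hpls
  obtain ⟨_, b1, b2⟩ := hple
  obtain ⟨_, c1, c2⟩ := hprs
  obtain ⟨_, d1, d2⟩ := hpre_
  obtain ⟨_, e1, e2⟩ := hpm
  have c3 : (u.reg .rsp).toNat + 8 ≤ (u.reg .rcx).toNat := by omega
  have d3 : (u.reg .rsp).toNat + 8 ≤ (u.reg .r8).toNat := by omega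
  have hwf : 1154368 ≤ (u.reg .rdi).toNat ∧ (u.reg .rdi).toNat + 1808 ≤ 12582912 := ⟨hwhere.1, hwhere.2.1⟩
  clear hapart hinv hwrs hwre hwhere hd3 eB0 eB1
  -- the assertion at the join
  obtain ⟨w_rip, w_rsp, w_rbx, w_r14, w_r15, hilt, hmode, hflag, hnshort, hnlong, hwc, hleft, w_kept, hfr0⟩ := hs
  clear hleft hmode
  have w_eq := hfr0.code
  have hsame := hfr0.same
  have hun := hfr0.un
  have hdf := hfr0.df
  have hmx := hfr0.mx
  have hs7 := hfr0.s7
  have hs8 := hfr0.s8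
  have hm64 : (addr ((u.reg .rdi).toNat + 484 + 6 * i)).toNat = (u.reg .rdi).toNat + 484 + 6 * i := toNat_addr _ (by omega)
  have a152 : (u.reg .rdi + 152).toNat = (u.reg .rdi).toNat + 152 := toNat_add_ofNat (u.reg .rdi) 152 (by omega)
  -- the two fields the segment reads, in the present memory as in the entry memory: they are off the footprint
  have eflag : s.mem.readLE (addr ((u.reg .rdi).toNat + 484 + 6 * i)) 1 =
      u.mem.readLE (addr ((u.reg .rdi).toNat + 484 + 6 * i)) 1 :=
    hsame.readLE _ 1 (by omega) (by
      intro w hw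
      simp only [List.mem_cons, List.not_mem_nil, or_false] at hw
      rcases hw with rfl | rfl | rfl | rfl | rfl | rfl | rfl | rfl | rfl | rfl | rfl | rfl <;> simp only [] <;> omega)
  have eb0 : s.mem.readLE (u.reg .rdi + 152) 4 = u.mem.readLE (u.reg .rdi + 152) 4 :=
    hsame.readLE _ 4 (by omega) (by
      intro w hw
      simp only [List.mem_cons, List.not_mem_nil, or_false] at hw
      rcases hw with rfl | rfl | rfl | rfl | rfl | rfl | rfl | rfl | rfl | rfl | rfl | rfl <;> simp only [] <;> omega)
  have hn32 : n < 2 ^ 32 := by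
    by_cases hbf : bf = 0
    · rw [hnshort hbf]
      exact X86.User.Mem.readLE_lt u.mem _ 4
    · rw [hnlong hbf]
      exact X86.User.Mem.readLE_lt u.mem _ 4
  have hwc32 := X86.User.Mem.readLE_lt s.mem (u.reg .rsp - 64) 4
  -- rbp, r12 are dead at the join (the long arm overwrites them)
  obtain ⟨z, w_rbp⟩ : ∃ z, s.reg .rbp = z := ⟨_, rfl⟩
  obtain ⟨z12, w_r12⟩ : ∃ z, s.reg .r12 = z := ⟨_, rfl⟩
  u_walk hcode [hμ.vendor] until [Vorbis.L.vorbis_decode_initial.at_1133c3] span [Vorbis.L.textLo, Vorbis.L.textHi] side (v_side)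
  case check_11339c =>
    -- 0x11339c, `bf = 0`: the store `*p_right_start = window_center` (line 3200)
    have hun' : ShadowUntouched u.mem s_11339c.mem := by v_untouched
    exact hlrs.accSmall hsh.inv hun' _ 4 (by decide) (by u_omega) (by u_omega)
  case check_1133af =>
    -- 0x1133af, `bf = 0`: the store `*p_right_end = n` (line 3201)
    have hun' : ShadowUntouched u.mem s_1133af.mem := by v_untouched
    exact hlre.accSmall hsh.inv hun' _ 4 (by decide) (by u_omega) (by u_omega)
  case check_11339c =>
    -- 0x11339c, `bf ≠ 0 ∧ next ≠ 0`
    have hun' : ShadowUntouched u.mem s_11339c.mem := by v_untouched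
    exact hlrs.accSmall hsh.inv hun' _ 4 (by decide) (by u_omega) (by u_omega)
  case check_1133af =>
    -- 0x1133af, `bf ≠ 0 ∧ next ≠ 0`
    have hun' : ShadowUntouched u.mem s_1133af.mem := by v_untouched
    exact hlre.accSmall hsh.inv hun' _ 4 (by decide) (by u_omega) (by u_omega)
  case check_11334f =>
    -- 0x11334f: the load of `f->blocksize_0` (line 3197)
    have hun' : ShadowUntouched u.mem s_11334f.mem := by v_untouched
    refine hobj.accSmall hsh.inv hun' _ 4 (by decide) (by u_omega) ?_
    simp only [Vorbis.Off.sizeof.stb_vorbis]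
    u_omega
  case check_11336a =>
    -- 0x11336a: the store `*p_right_start = (n*3 - b0) >> 2` (line 3197)
    have hun' : ShadowUntouched u.mem s_11336a.mem := by v_untouched
    exact hlrs.accSmall hsh.inv hun' _ 4 (by decide) (by u_omega) (by u_omega)
  case check_113385 =>
    -- 0x113385: the store `*p_right_end = (n*3 + b0) >> 2` (line 3198)
    have hun' : ShadowUntouched u.mem s_113385.mem := by v_untouched
    exact hlre.accSmall hsh.inv hun' _ 4 (by decide) (by u_omega) (by u_omega)
  · -- 0x1133c3 from 0x1133bc, `bf = 0`: `(window_center, n)` is stored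
    have hr := right_short (s.mem.readLE (u.reg .rsp - 64) 4) n hwc32 hn32
    refine ReachVia.done ?_
    refine exit_ok hLay hE hs0 w_rip w_rsp w_rax (w_kept.mono_all (by rfl)) w_mem w_eq ?_ w_mxcsr
      (BitVec.isLt _) (BitVec.isLt _) (Or.inl ⟨?_, hr.2⟩)
    · rw [w_flags]
      exact w_df_1133af
    · rw [hr.1]
      exact hwc
  · -- 0x1133c3 from 0x1133bc, `bf ≠ 0 ∧ next ≠ 0`: `(window_center, n)` is stored
    have hr := right_short (s.mem.readLE (u.reg .rsp - 64) 4) n hwc32 hn32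
    refine ReachVia.done ?_
    refine exit_ok hLay hE hs0 w_rip w_rsp w_rax (w_kept.mono_all (by rfl)) w_mem w_eq ?_ w_mxcsr
      (BitVec.isLt _) (BitVec.isLt _) (Or.inl ⟨?_, hr.2⟩)
    · rw [w_flags]
      exact w_df_1133af
    · rw [hr.1]
      exact hwc
  · -- 0x1133c3 from 0x113392, `bf ≠ 0 ∧ next = 0`: `((3n − b0) >> 2, (3n + b0) >> 2)` is stored
    have hbf : bf ≠ 0 := by
      intro h0
      rw [h0] at hbr_11333b
      exact hbr_11333b (by decide)
    have hnle : n ≤ 8192 := by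
      rw [hnlong hbf]
      exact hb1le
    have hr := right_long n (u.mem.readLE (u.reg .rdi + 152) 4) hnle hb0le
    refine ReachVia.done ?_
    refine exit_ok hLay hE hs0 w_rip w_rsp w_rax (w_kept.mono_all (by rfl)) w_mem w_eq ?_ w_mxcsr
      (BitVec.isLt _) (BitVec.isLt _) (Or.inr ⟨hbf, hr.1, hr.2⟩)
    rw [w_flags]
    exact w_df_113385

end Vorbis.Spec.vorbis_decode_initial_8

/-- Unit `vorbis_decode_initial.8`: segment 8 of `vorbis_decode_initial` takes `IAtRight` to `IAtEnd`. -/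
theorem Vorbis.Spec.Worked.vorbis_decode_initial_8_ok : Vorbis.Spec.vorbis_decode_initial_8.Statement :=
  Vorbis.Spec.vorbis_decode_initial_8.seg8
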